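-- pv_equiv track=rewrite | github.com/remyoudompheng/pyroclastic | pyroclastic/sieve.py | expand_polys
-- ===== SOURCE A (Python) =====
-- import itertools
--
-- def expand_polys(N: int, A: int, Bi: list[int]):
--     polys = []
--     for bis in itertools.product(*[(b, -b) for b in Bi[:0:-1]]):
--         B = Bi[0] + sum(bis)
--         C = (B**2 - N) // (4 * A)
--         polys.append((A, B, C))
--     assert polys[0][1] == sum(Bi)
--     assert polys[1][1] == sum(Bi) - 2 * Bi[1]
--     assert polys[-1][1] == Bi[0] - sum(Bi[1:])
--     return polys
-- ===== SOURCE B (Python) =====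
-- def expand_polys(N: int, A: int, Bi: list[int]):
--     def go(factors, B):
--         if not factors:
--             return [(A, B, (B * B - N) // (4 * A))]
--         b = factors[0]
--         return go(factors[1:], B + b) + go(factors[1:], B - b)
--     return go(Bi[:0:-1], Bi[0])
-- ===== Notes on version B (the rewrite author's own statement) =====
-- stated objective: alternative
-- what changed: Replaces the itertools.product loop (materialising all sign tuples and summing each) by a recursive DFS over the reversed tail factors that threads the partial B value down the recursion, emitting (A,B,C) at the leaves in the same order.
import Mathlib
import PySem

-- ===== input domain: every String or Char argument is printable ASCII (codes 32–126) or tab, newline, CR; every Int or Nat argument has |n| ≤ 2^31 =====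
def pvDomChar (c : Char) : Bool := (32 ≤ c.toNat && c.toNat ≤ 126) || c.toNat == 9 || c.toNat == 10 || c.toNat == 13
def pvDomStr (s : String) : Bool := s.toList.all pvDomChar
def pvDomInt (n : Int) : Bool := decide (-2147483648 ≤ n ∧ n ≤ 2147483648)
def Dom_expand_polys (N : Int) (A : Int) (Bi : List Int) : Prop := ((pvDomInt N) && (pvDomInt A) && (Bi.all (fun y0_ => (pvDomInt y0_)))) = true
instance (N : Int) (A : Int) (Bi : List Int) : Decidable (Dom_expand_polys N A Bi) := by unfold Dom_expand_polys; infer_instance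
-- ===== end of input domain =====

-- B replaces the itertools.product loop by a recursive DFS over the reversed tail factors,
-- threading the partial B value down the recursion (objective: alternative decomposition).

-- ===== PORT A =====
-- itertools.product(*factors) transliterated as the standard left fold:
-- each factor multiplies the accumulated tuple list, first factor varying slowest.
def pyProduct (factors : List (List Int)) : List (List Int) :=
  factors.foldl (fun acc f => acc.flatMap (fun t => f.map (fun x => t ++ [x]))) [[]]

-- The three trailing asserts of A never change the returned value; Pre_ excludes
-- len(Bi) < 2 (polys[1] would raise IndexError) and A = 0 (ZeroDivisionError).
def expand_polys (N : Int) (A : Int) (Bi : List Int) : List (Int × Int × Int) :=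
  let factors := ((PySem.List.slice? Bi none (some 0) (-1)).getD []).map (fun b => [b, -b])
  (pyProduct factors).foldl (fun polys bis =>
    let B := (PySem.List.pyGet? Bi 0).getD 0 + bis.sum
    let C := PySem.Int.floordiv (B ^ 2 - N) (4 * A)
    polys ++ [(A, B, C)]) []

-- ===== PORT B =====
-- go(factors, B): leaf appends the finished polynomial, otherwise branch on +b then -b.
def expandGo (N : Int) (A : Int) : List Int → Int → List (Int × Int × Int)
  | [], B => [(A, B, PySem.Int.floordiv (B * B - N) (4 * A))]
  | b :: rest, B => expandGo N A rest (B + b) ++ expandGo N A rest (B - b)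

def expand_polys_alt (N : Int) (A : Int) (Bi : List Int) : List (Int × Int × Int) :=
  expandGo N A ((PySem.List.slice? Bi none (some 0) (-1)).getD [])
    ((PySem.List.pyGet? Bi 0).getD 0)

-- ===== PRECONDITION & SPEC =====
-- len(Bi) < 2 makes A raise IndexError at polys[1]; A = 0 makes it raise ZeroDivisionError.
def Pre_expand_polys (N : Int) (A : Int) (Bi : List Int) : Prop :=
  2 ≤ Bi.length ∧ A ≠ 0
instance (N : Int) (A : Int) (Bi : List Int) : Decidable (Pre_expand_polys N A Bi) := by
  unfold Pre_expand_polys; infer_instance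

def pvWitness_expand_polys : Int × Int × List Int := (17, 3, [5, 2, 1])

def Spec_expand_polys (N : Int) (A : Int) (Bi : List Int) (out : List (Int × Int × Int)) : Prop := out = expand_polys_alt N A Bi
instance (N : Int) (A : Int) (Bi : List Int) (out : List (Int × Int × Int)) : Decidable (Spec_expand_polys N A Bi out) := by unfold Spec_expand_polys; infer_instance

-- ===== CLAIM (what is proved, stated in full; the proofs are below) =====
def Claim_equal_expand_polys : Prop := ∀ (N : Int) (A : Int) (Bi : List Int), Dom_expand_polys N A Bi → Pre_expand_polys N A Bi → Spec_expand_polys N A Bi (expand_polys N A Bi)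

-- ===== LEMMAS AND PROOFS =====

-- reversed-index filterMap over a range is the reversed tail
theorem filterMap_rev (t : List Int) :
    List.filterMap (fun k => t[t.length - 1 - k]?) (List.range t.length) = t.reverse := by
  induction t with
  | nil => simp
  | cons b t ih =>
    rw [List.length_cons, List.range_succ, List.filterMap_append]
    simp only [Nat.add_sub_cancel]
    have h1 : List.filterMap (fun k => (b :: t)[t.length - k]?) (List.range t.length)
        = List.filterMap (fun k => t[t.length - 1 - k]?) (List.range t.length) := by
      refine List.filterMap_congr (fun k hk => ?_)
      have hk' : k < t.length := List.mem_range.mp hk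
      have h2 : t.length - k = (t.length - 1 - k) + 1 := by omega
      rw [h2, List.getElem?_cons_succ]
    rw [h1, ih]
    simp

-- Bi[:0:-1] is the reversed tail (for nonempty Bi)
theorem slice_rev (xs : List Int) (h : xs ≠ []) :
    PySem.List.slice? xs none (some 0) (-1) = some xs.tail.reverse := by
  have hl : 1 ≤ xs.length := List.length_pos_iff.mpr h
  simp only [PySem.List.slice?, PySem.List.sliceIndices, Int.reduceNeg, Int.neg_neg_iff_pos,
    zero_lt_one, ↓reduceIte, lt_self_iff_false]
  have h0 : ¬ ((-1 : Int) = 0) := by decide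
  have h1 : ¬ ((0 : Int) < -1) := by decide
  simp only [h0, h1, if_false]
  have hmin : min 0 ((xs.length : Int) - 1) = 0 := min_eq_left (by omega)
  rw [hmin]
  have hrange : (if (0 : Int) < (xs.length : Int) - 1
      then (((xs.length : Int) - 1 - 0 + 1 - 1) / 1).toNat else 0) = xs.length - 1 := by
    simp only [Int.ediv_one]
    split_ifs with hc <;> omega
  rw [hrange]
  have hcg : List.filterMap (fun k : Nat => xs[((xs.length : Int) - 1 + -1 * (k : Int)).toNat]?)
      (List.range (xs.length - 1))
      = List.filterMap (fun k : Nat => xs[xs.length - 1 - k]?) (List.range (xs.length - 1)) := by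
    refine List.filterMap_congr (fun k _ => ?_)
    have : ((xs.length : Int) - 1 + -1 * (k : Int)).toNat = xs.length - 1 - k := by omega
    rw [this]
  rw [hcg]
  have hlt : xs.tail.length = xs.length - 1 := by simp
  refine congrArg some ?_
  rw [← filterMap_rev xs.tail, hlt]
  refine List.filterMap_congr (fun k hk => ?_)
  have hk' : k < xs.length - 1 := List.mem_range.mp hk
  cases xs with
  | nil => simp at hl
  | cons a t =>
    simp only [List.tail_cons, List.length_cons, Nat.add_sub_cancel]
    have h2 : t.length - k = (t.length - 1 - k) + 1 := by
      simp only [List.length_cons] at hk'; omega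
    rw [h2, List.getElem?_cons_succ]

-- the appending foldl over the tuple list is a map of the triple-builder
theorem foldl_triples (N A B0 : Int) (L : List (List Int)) :
    L.foldl (fun polys bis =>
        polys ++ [(A, B0 + bis.sum, PySem.Int.floordiv ((B0 + bis.sum) ^ 2 - N) (4 * A))]) []
      = L.map (fun bis => (A, B0 + bis.sum, PySem.Int.floordiv ((B0 + bis.sum) ^ 2 - N) (4 * A))) := by
  rw [PySem.List.foldl_append_singleton_eq_map]
  simp

-- core invariant: the product fold followed by the triple map is the DFS over each seed tuple
theorem prod_eq_dfs (N A B0 : Int) (fs : List Int) (acc : List (List Int)) :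
    ((fs.map (fun b => [b, -b])).foldl
        (fun acc f => acc.flatMap (fun t => f.map (fun x => t ++ [x]))) acc).map
      (fun bis => (A, B0 + bis.sum, PySem.Int.floordiv ((B0 + bis.sum) ^ 2 - N) (4 * A)))
      = acc.flatMap (fun t => expandGo N A fs (B0 + t.sum)) := by
  induction fs generalizing acc with
  | nil =>
    simp [expandGo, List.map_eq_flatMap, sq]
  | cons b fs ih =>
    simp only [List.map_cons, List.foldl_cons]
    rw [ih, List.flatMap_assoc]
    refine List.flatMap_congr (fun t _ => ?_)
    simp [expandGo, List.sum_append, add_assoc, sub_eq_add_neg]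

-- ===== VERDICT (by name: the statement is the Claim_ definition above) =====
theorem expand_polys_spec : Claim_equal_expand_polys := by
  intro N A Bi _ hpre
  unfold Spec_expand_polys expand_polys expand_polys_alt pyProduct
  have hne : Bi ≠ [] := by
    intro h; rw [h] at hpre; simp [Pre_expand_polys] at hpre
  rw [slice_rev Bi hne]
  simp only [Option.getD_some]
  rw [foldl_triples, prod_eq_dfs]
  simp
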